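-- pv_equiv track=rewrite | github.com/LostNeverKnown/Python-labs | python course/lab3/frekvens_analys.py | closest_word
-- ===== SOURCE A (Python) =====
-- def closest_word(word_dict, rate):
--     """Returns the word with the word count closest to number"""
--     return_key = ""
--     check_dict = {}
--     for key in word_dict:
--         check = abs(rate-word_dict[key])
--         check_dict[key] = check
--     return_key = min(check_dict, key=check_dict.get)
--
--     return return_key
-- ===== SOURCE B (Python) =====
-- def closest_word(word_dict, rate):
--     """Returns the word with the word count closest to number"""
--     best_key = None
--     best_diff = None
--     for key, value in word_dict.items():
--         diff = abs(rate - value)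
--         if best_diff is None or diff < best_diff:
--             best_key, best_diff = key, diff
--     return best_key
-- ===== Notes on version B (the rewrite author's own statement) =====
-- stated objective: simpler
-- what changed: Replaced the auxiliary check_dict (built in one pass, then min(...) over it in a second pass) with a single best-so-far loop over the items using strict '<' so the first minimum wins; Pre_ excludes the empty dict, where A's min() raises ValueError, and duplicate keys, which cannot occur in a real Python dict.
import Mathlib
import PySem

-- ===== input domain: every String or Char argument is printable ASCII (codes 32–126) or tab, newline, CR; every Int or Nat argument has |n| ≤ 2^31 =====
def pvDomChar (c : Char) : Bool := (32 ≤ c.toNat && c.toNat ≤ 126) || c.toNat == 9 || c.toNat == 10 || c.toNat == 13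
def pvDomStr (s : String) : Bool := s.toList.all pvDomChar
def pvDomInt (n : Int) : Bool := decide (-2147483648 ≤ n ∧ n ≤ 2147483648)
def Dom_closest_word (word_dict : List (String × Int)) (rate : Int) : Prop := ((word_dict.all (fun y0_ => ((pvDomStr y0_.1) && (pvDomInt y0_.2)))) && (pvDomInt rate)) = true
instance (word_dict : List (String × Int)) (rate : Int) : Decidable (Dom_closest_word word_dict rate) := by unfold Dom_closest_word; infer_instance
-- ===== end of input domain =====

-- B replaces A's auxiliary check_dict plus the min(..., key=...) second pass by a single
-- best-so-far loop over the items (strict '<' keeps min's first-wins tie-breaking).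


-- ===== PORT A =====
-- for key in word_dict: check_dict[key] = abs(rate - word_dict[key]); then
-- min(check_dict, key=check_dict.get).  word_dict[key] is first-match lookup in the
-- association list (under Pre_ keys are unique, so this is the dict lookup; getD's
-- default is never reached since every looked-up key is present).
def closest_word (word_dict : List (String × Int)) (rate : Int) : String :=
  let check_dict : PySem.Dict String Int :=
    word_dict.foldl
      (fun d kv => d.insert kv.1 |rate - PySem.Dict.getD (PySem.Dict.mk word_dict) kv.1 0|)
      PySem.Dict.empty
  match PySem.List.min? check_dict.keys (fun k => check_dict.getD k 0) with
  | some k => k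
  | none => ""   -- Python: min() raises ValueError on an empty dict; excluded by Pre_

-- ===== PORT B =====
-- the best-so-far loop: best = None / some (best_key, best_diff)
def closestWordLoop (rate : Int) : List (String × Int) → Option (String × Int) → Option (String × Int)
  | [], best => best
  | (k, v) :: rest, best =>
      let diff := |rate - v|
      match best with
      | none => closestWordLoop rate rest (some (k, diff))
      | some (bk, bd) =>
          if diff < bd then closestWordLoop rate rest (some (k, diff))
          else closestWordLoop rate rest (some (bk, bd))

def closest_word_alt (word_dict : List (String × Int)) (rate : Int) : String :=
  match closestWordLoop rate word_dict none with
  | some (bk, _) => bk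
  | none => ""   -- Python B returns None (not a String) on an empty dict; excluded by Pre_

-- ===== PRECONDITION & SPEC =====
-- Pre_ excludes the empty dict, on which A's min() raises ValueError (B returns None,
-- not a string), and association lists with duplicate keys, which do not represent a
-- Python dict (the dict built at the call boundary collapses them, so the ports'
-- first-match list encoding cannot mirror it).
def Pre_closest_word (word_dict : List (String × Int)) (rate : Int) : Prop :=
  word_dict ≠ [] ∧ (word_dict.map Prod.fst).Nodup
instance (word_dict : List (String × Int)) (rate : Int) : Decidable (Pre_closest_word word_dict rate) := by unfold Pre_closest_word; infer_instance
def pvWitness_closest_word : (List (String × Int)) × Int := ([("a", 1), ("b", 3)], 2)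

def Spec_closest_word (word_dict : List (String × Int)) (rate : Int) (out : String) : Prop := out = closest_word_alt word_dict rate
instance (word_dict : List (String × Int)) (rate : Int) (out : String) : Decidable (Spec_closest_word word_dict rate out) := by unfold Spec_closest_word; infer_instance

-- ===== CLAIM (what is proved, stated in full; the proofs are below) =====
def Claim_equal_closest_word : Prop := ∀ (word_dict : List (String × Int)) (rate : Int), Dom_closest_word word_dict rate → Pre_closest_word word_dict rate → Spec_closest_word word_dict rate (closest_word word_dict rate)

-- ===== LEMMAS AND PROOFS =====

-- folding one more element into a running min (first-wins: strict '<' moves the head)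
theorem min?_cons_cons {A : Type} (key : A → Int) (x y : A) (t : List A) :
    PySem.List.min? (x :: y :: t) key
      = PySem.List.min? ((if key y < key x then y else x) :: t) key := by
  by_cases hc : key y < key x <;> simp [PySem.List.min?, hc]

-- A's min over the keys (looked up through h) is the min over the pairs themselves
theorem min?_fst_aux (h : String → Int) (t : List (String × Int)) (z : String × Int)
    (hall : ∀ p ∈ z :: t, h p.1 = p.2) :
    PySem.List.min? (z.1 :: t.map Prod.fst) h
      = Option.map Prod.fst (PySem.List.min? (z :: t) (fun p => p.2)) := by
  induction t generalizing z with
  | nil => simp [PySem.List.min?]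
  | cons q t ih =>
      have hz : h z.1 = z.2 := hall z (by simp)
      have hq : h q.1 = q.2 := hall q (by simp)
      rw [List.map_cons, min?_cons_cons h z.1 q.1, min?_cons_cons (fun p => p.2) z q]
      have hhead : (if h q.1 < h z.1 then q.1 else z.1) = (if q.2 < z.2 then q else z).1 := by
        rw [hz, hq]; exact (apply_ite Prod.fst _ q z).symm
      rw [hhead]
      refine ih (if q.2 < z.2 then q else z) ?_
      intro p hp
      rcases List.mem_cons.mp hp with rfl | hp
      · split_ifs with hc
        · exact hq
        · exact hz
      · exact hall p (by simp [hp])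

-- B's best-so-far loop computes the first-wins min of the (key, diff) pairs
theorem loopMin (rate : Int) (t : List (String × Int)) (z : String × Int) :
    closestWordLoop rate t (some z)
      = PySem.List.min? (z :: t.map (fun kv => (kv.1, |rate - kv.2|))) (fun p => p.2) := by
  induction t generalizing z with
  | nil => simp [closestWordLoop, PySem.List.min?]
  | cons q t ih =>
      obtain ⟨qk, qv⟩ := q
      obtain ⟨zk, zd⟩ := z
      rw [List.map_cons, min?_cons_cons (fun p => p.2) (zk, zd) (qk, |rate - qv|)]
      by_cases hc : |rate - qv| < zd
      · simpa [closestWordLoop, hc] using ih (qk, |rate - qv|)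
      · simpa [closestWordLoop, hc] using ih (zk, zd)

-- ===== VERDICT (by name: the statement is the Claim_ definition above) =====
theorem closest_word_spec : Claim_equal_closest_word := by
  intro word_dict rate _hdom hpre
  obtain ⟨hne, hnd⟩ := hpre
  obtain ⟨p, rest, rfl⟩ : ∃ p rest, word_dict = p :: rest := by
    cases word_dict with
    | nil => exact absurd rfl hne
    | cons p rest => exact ⟨p, rest, rfl⟩
  obtain ⟨k, v⟩ := p
  unfold Spec_closest_word closest_word closest_word_alt
  -- first-match lookup in the association list is the pair's own value (keys unique)
  have hlook : ∀ kv ∈ (k, v) :: rest,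
      PySem.Dict.getD (PySem.Dict.mk ((k, v) :: rest)) kv.1 0 = kv.2 := fun kv hkv =>
    PySem.Dict.getD_of_mem_items (PySem.Dict.mk ((k, v) :: rest)) hkv hnd 0
  set ds := ((k, v) :: rest).map (fun kv => (kv.1, |rate - kv.2|)) with hds
  set check_dict : PySem.Dict String Int :=
    ((k, v) :: rest).foldl
      (fun d kv => d.insert kv.1 |rate - PySem.Dict.getD (PySem.Dict.mk ((k, v) :: rest)) kv.1 0|)
      PySem.Dict.empty with hcd
  -- the loop over fresh distinct keys appends: check_dict.items = ds
  have hitems : check_dict.items = ds := by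
    rw [hcd, PySem.Dict.items_foldl_insert_fresh ((k, v) :: rest) Prod.fst
        (fun kv => |rate - PySem.Dict.getD (PySem.Dict.mk ((k, v) :: rest)) kv.1 0|)
        PySem.Dict.empty (fun a _ => by simp [pysem]) hnd]
    show [] ++ _ = _
    rw [List.nil_append, hds]
    exact List.map_congr_left (fun kv hkv => by rw [hlook kv hkv])
  have hkeys : check_dict.keys = ds.map Prod.fst := by
    simp only [PySem.Dict.keys, hitems]
  -- the looked-up diffs are the pairs' own diffs
  have hget : ∀ q ∈ ds, check_dict.getD q.1 0 = q.2 := fun q hq =>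
    PySem.Dict.getD_of_mem_items check_dict (by rw [hitems]; exact hq)
      (by simpa [PySem.Dict.keys, hitems, hds, Function.comp] using hnd) 0
  have hds' : ds = (k, |rate - v|) :: rest.map (fun kv => (kv.1, |rate - kv.2|)) := by
    simp [hds]
  -- A's side: min over keys = min over pairs, projected
  have hA : PySem.List.min? check_dict.keys (fun x => check_dict.getD x 0)
      = Option.map Prod.fst (PySem.List.min? ds (fun q => q.2)) := by
    rw [hkeys, hds']
    have h1 := min?_fst_aux (fun x => check_dict.getD x 0)
        (rest.map (fun kv => (kv.1, |rate - kv.2|))) (k, |rate - v|)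
        (by rw [← hds']; exact hget)
    simpa using h1
  -- B's side: the loop = min over pairs
  have hB : closestWordLoop rate ((k, v) :: rest) none
      = PySem.List.min? ds (fun q => q.2) := by
    show closestWordLoop rate rest (some (k, |rate - v|)) = _
    rw [hds']
    exact loopMin rate rest (k, |rate - v|)
  show (match PySem.List.min? check_dict.keys (fun x => check_dict.getD x 0) with
        | some x => x
        | none => "") = _
  rw [hA, hB]
  cases PySem.List.min? ds (fun q => q.2) with
  | none => rfl
  | some q => obtain ⟨a, b⟩ := q; rfl
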